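-- pv_equiv track=rewrite | github.com/photboll/leetcode | 3742.maximum-path-score-in-a-grid.py | maxPathScore
-- ===== SOURCE A (Python) =====
-- from typing import List
--
-- def maxPathScore(grid: List[List[int]], k: int) -> int:
--
--     m = len(grid)
--     n = len(grid[0])
--     #dp[i][j][c] maximum score that can be achieved at i, j with exactly c costs
--     dp = [[[-1]*(k+1) for _ in range(n)] for _ in range(m)]
--
--     for i in range(m-1, -1, -1):
--         for j in range(n-1, -1, -1):
--
--             for cost in range(k+1):
--                 new_cost = cost + 1 if grid[i][j] > 0 else cost
--                 if new_cost > k: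
--                     continue
--
--                 if i == m-1 and j == n-1:
--                     dp[i][j][cost] = grid[i][j]
--                     continue
--
--                 best_next = max(
--                     dp[i+1][j][new_cost] if i + 1  <  m else -1,
--                     dp[i][j+1][new_cost] if j + 1 < n else -1
--                 )
--
--                 if best_next > -1:
--                     dp[i][j][cost] = grid[i][j] + best_next
--
--     return dp[0][0][0]
-- ===== SOURCE B (Python) =====
-- from typing import List
--
-- def maxPathScore(grid: List[List[int]], k: int) -> int:
--     m, n = len(grid), len(grid[0])
--     memo = {}
--
--     def f(i, j, cost):
--         key = (i, j, cost)
--         if key in memo: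
--             return memo[key]
--         g = grid[i][j]
--         nc = cost + 1 if g > 0 else cost
--         if nc > k:
--             res = -1
--         elif i == m - 1 and j == n - 1:
--             res = g
--         else:
--             down = f(i + 1, j, nc) if i + 1 < m else -1
--             right = f(i, j + 1, nc) if j + 1 < n else -1
--             best = down if down > right else right
--             res = g + best if best > -1 else -1
--         memo[key] = res
--         return res
--
--     return f(0, 0, 0)
-- ===== Notes on version B (the rewrite author's own statement) =====
-- stated objective: alternative
-- what changed: Replaced the bottom-up triple-nested DP table (m*n*(k+1) array filled in reverse order) by a top-down memoized recursion f(i,j,cost) that only visits states reachable from (0,0,0).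
import Mathlib
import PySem

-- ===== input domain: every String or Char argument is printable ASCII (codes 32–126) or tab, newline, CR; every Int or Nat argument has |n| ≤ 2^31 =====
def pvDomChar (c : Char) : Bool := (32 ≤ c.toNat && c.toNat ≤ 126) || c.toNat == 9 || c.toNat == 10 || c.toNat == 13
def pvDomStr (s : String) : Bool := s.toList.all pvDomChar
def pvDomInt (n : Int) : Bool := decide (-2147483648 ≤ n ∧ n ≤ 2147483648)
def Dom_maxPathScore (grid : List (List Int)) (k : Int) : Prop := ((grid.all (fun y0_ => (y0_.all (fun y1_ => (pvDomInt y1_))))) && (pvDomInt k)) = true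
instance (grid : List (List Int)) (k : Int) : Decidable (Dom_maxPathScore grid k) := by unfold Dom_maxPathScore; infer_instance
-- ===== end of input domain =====

-- B replaces A's bottom-up m×n×(k+1) DP table by a top-down memoized recursion over (i, j, cost)
-- that only visits states reachable from (0,0,0); equal return values proved on Pre_.

-- ===== PORT A =====
-- grid[i][j] / dp[i][j][c] / dp[i][j][c] = x; indices are nonnegative and in range wherever the
-- ports use them under Pre_, so the total getD/setD forms are exact there.
def pvGet2 (grid : List (List Int)) (i j : Int) : Int :=
  PySem.List.pyGetD (PySem.List.pyGetD grid i []) j 0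

def pvGet3 (dp : List (List (List Int))) (i j c : Int) : Int :=
  PySem.List.pyGetD (PySem.List.pyGetD (PySem.List.pyGetD dp i []) j []) c (-1)

def pvSet3 (dp : List (List (List Int))) (i j c : Int) (x : Int) : List (List (List Int)) :=
  PySem.List.pySetD dp i
    (PySem.List.pySetD (PySem.List.pyGetD dp i []) j
      (PySem.List.pySetD (PySem.List.pyGetD (PySem.List.pyGetD dp i []) j []) c x))

-- body of A's innermost loop (one value of cost)
def pvCostStep (grid : List (List Int)) (k m n i j : Int)
    (dp : List (List (List Int))) (cost : Int) : List (List (List Int)) :=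
  let nc := if pvGet2 grid i j > 0 then cost + 1 else cost
  if nc > k then dp
  else if i = m - 1 ∧ j = n - 1 then pvSet3 dp i j cost (pvGet2 grid i j)
  else
    let bn := max (if i + 1 < m then pvGet3 dp (i + 1) j nc else -1)
                  (if j + 1 < n then pvGet3 dp i (j + 1) nc else -1)
    if bn > -1 then pvSet3 dp i j cost (pvGet2 grid i j + bn) else dp

-- body of A's middle loop (one value of j: the 'for cost in range(k+1)' loop)
def pvColStep (grid : List (List Int)) (k m n i : Int)
    (dp : List (List (List Int))) (j : Int) : List (List (List Int)) :=
  (PySem.List.pyRange 0 (k + 1) 1).foldl (pvCostStep grid k m n i j) dp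

-- body of A's outer loop (one value of i: the 'for j in range(n-1,-1,-1)' loop)
def pvRowStep (grid : List (List Int)) (k m n : Int)
    (dp : List (List (List Int))) (i : Int) : List (List (List Int)) :=
  (PySem.List.pyRange (n - 1) (-1) (-1)).foldl (pvColStep grid k m n i) dp

def maxPathScore (grid : List (List Int)) (k : Int) : Int :=
  let m : Int := grid.length
  let n : Int := (PySem.List.pyGetD grid 0 ([] : List Int)).length
  let dp0 : List (List (List Int)) :=
    List.replicate m.toNat (List.replicate n.toNat (List.replicate (k + 1).toNat (-1 : Int)))
  let dp := (PySem.List.pyRange (m - 1) (-1) (-1)).foldl (pvRowStep grid k m n) dp0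
  pvGet3 dp 0 0 0

-- ===== PORT B =====
-- Source B's memoized recursion f(i, j, cost); the memo dict is threaded through explicitly.
-- fuel only makes the recursion structural; it exceeds the recursion depth at every call site.
def pvBRec (grid : List (List Int)) (k m n : Int) (fuel : Nat) (i j cost : Int)
    (memo : PySem.Dict (Int × Int × Int) Int) : Int × PySem.Dict (Int × Int × Int) Int :=
  match fuel with
  | 0 => (-1, memo)
  | fuel + 1 =>
    match memo.get? (i, j, cost) with
    | some v => (v, memo)
    | none =>
      let g := pvGet2 grid i j
      let nc := if g > 0 then cost + 1 else cost
      if nc > k then (-1, memo.insert (i, j, cost) (-1))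
      else if i = m - 1 ∧ j = n - 1 then (g, memo.insert (i, j, cost) g)
      else
        let p1 := if i + 1 < m then pvBRec grid k m n fuel (i + 1) j nc memo else (-1, memo)
        let p2 := if j + 1 < n then pvBRec grid k m n fuel i (j + 1) nc p1.2 else (-1, p1.2)
        let best := max p1.1 p2.1
        let res := if best > -1 then g + best else -1
        (res, p2.2.insert (i, j, cost) res)

def maxPathScore_alt (grid : List (List Int)) (k : Int) : Int :=
  let m : Int := grid.length
  let n : Int := (PySem.List.pyGetD grid 0 ([] : List Int)).length
  (pvBRec grid k m n (m.toNat + n.toNat + 1) 0 0 0 PySem.Dict.empty).1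

-- ===== PRECONDITION & SPEC =====
-- Pre_ excludes exactly the inputs where Python A raises: an empty grid or empty first row
-- (IndexError building/reading dp), a later row shorter than row 0 (IndexError on grid[i][j]),
-- and k < 0 (the cost dimension of dp is empty, IndexError on dp[0][0][0]).
def Pre_maxPathScore (grid : List (List Int)) (k : Int) : Prop :=
  grid ≠ [] ∧ 0 < (PySem.List.pyGetD grid 0 ([] : List Int)).length ∧
    (∀ r ∈ grid, (PySem.List.pyGetD grid 0 ([] : List Int)).length ≤ r.length) ∧ 0 ≤ k
instance (grid : List (List Int)) (k : Int) : Decidable (Pre_maxPathScore grid k) := by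
  unfold Pre_maxPathScore; infer_instance

def pvWitness_maxPathScore : List (List Int) × Int := ([[1, -2], [3, 4]], 1)

def Spec_maxPathScore (grid : List (List Int)) (k : Int) (out : Int) : Prop :=
  out = maxPathScore_alt grid k
instance (grid : List (List Int)) (k : Int) (out : Int) : Decidable (Spec_maxPathScore grid k out) := by
  unfold Spec_maxPathScore; infer_instance

-- ===== CLAIM (what is proved, stated in full; the proofs are below) =====
def Claim_equal_maxPathScore : Prop := ∀ (grid : List (List Int)) (k : Int), Dom_maxPathScore grid k → Pre_maxPathScore grid k → Spec_maxPathScore grid k (maxPathScore grid k)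

-- ===== LEMMAS AND PROOFS =====

-- the common value function both programs compute: best score from (i,j) with 'cost' already spent
def pvV (grid : List (List Int)) (k i j cost : Int) : Int :=
  if (if pvGet2 grid i j > 0 then cost + 1 else cost) > k then -1
  else if i = (grid.length : Int) - 1 ∧ j = ((PySem.List.pyGetD grid 0 ([] : List Int)).length : Int) - 1 then
    pvGet2 grid i j
  else
    if (max (if _h : i + 1 < (grid.length : Int) then
               pvV grid k (i + 1) j (if pvGet2 grid i j > 0 then cost + 1 else cost) else -1)
            (if _h : j + 1 < ((PySem.List.pyGetD grid 0 ([] : List Int)).length : Int) then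
               pvV grid k i (j + 1) (if pvGet2 grid i j > 0 then cost + 1 else cost) else -1)) > -1 then
      pvGet2 grid i j +
        max (if _h : i + 1 < (grid.length : Int) then
               pvV grid k (i + 1) j (if pvGet2 grid i j > 0 then cost + 1 else cost) else -1)
            (if _h : j + 1 < ((PySem.List.pyGetD grid 0 ([] : List Int)).length : Int) then
               pvV grid k i (j + 1) (if pvGet2 grid i j > 0 then cost + 1 else cost) else -1)
    else -1
termination_by (((grid.length : Int) - i).toNat + (((PySem.List.pyGetD grid 0 ([] : List Int)).length : Int) - j).toNat)
decreasing_by all_goals omega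

abbrev pvN (grid : List (List Int)) : Nat := (PySem.List.pyGetD grid 0 ([] : List Int)).length
abbrev pvK (k : Int) : Nat := (k + 1).toNat

def pvGN (dp : List (List (List Int))) (i j c : Nat) : Int :=
  ((dp.getD i []).getD j []).getD c (-1)

def pvSetN (dp : List (List (List Int))) (i j c : Nat) (x : Int) : List (List (List Int)) :=
  dp.set i ((dp.getD i []).set j (((dp.getD i []).getD j []).set c x))

def pvShape (grid : List (List Int)) (k : Int) (dp : List (List (List Int))) : Prop :=
  dp.length = grid.length ∧
  (∀ i, i < grid.length → (dp.getD i []).length = pvN grid) ∧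
  (∀ i j, i < grid.length → j < pvN grid → ((dp.getD i []).getD j []).length = pvK k)

def pvRowsDone (grid : List (List Int)) (k : Int) (dp : List (List (List Int))) (t : Nat) : Prop :=
  pvShape grid k dp ∧
  ∀ i j c : Nat, i < grid.length → j < pvN grid → c < pvK k →
    pvGN dp i j c = if t ≤ i then pvV grid k i j c else -1

def pvRowDone (grid : List (List Int)) (k : Int) (dp : List (List (List Int))) (t s : Nat) : Prop :=
  pvShape grid k dp ∧
  ∀ i j c : Nat, i < grid.length → j < pvN grid → c < pvK k →
    pvGN dp i j c = if t < i ∨ (i = t ∧ s ≤ j) then pvV grid k i j c else -1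

def pvAgrees (grid : List (List Int)) (k : Int) (memo : PySem.Dict (Int × Int × Int) Int) : Prop :=
  ∀ (i j c v : Int), memo.get? (i, j, c) = some v → v = pvV grid k i j c

lemma pvGetD_set_self {α : Type} (l : List α) (i : Nat) (x d : α) (h : i < l.length) :
    (l.set i x).getD i d = x := by
  simp [List.getD_eq_getElem?_getD, h]

lemma pvGetD_set_ne {α : Type} (l : List α) (i j : Nat) (x d : α) (h : i ≠ j) :
    (l.set i x).getD j d = l.getD j d := by
  simp [List.getD_eq_getElem?_getD, h]

lemma pvGet3_natCast (dp : List (List (List Int))) (i j c : Nat) :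
    pvGet3 dp (i : Int) (j : Int) (c : Int) = pvGN dp i j c := by
  simp [pvGet3, pvGN, PySem.List.pyGetD_natCast]

lemma pvSet3_natCast (dp : List (List (List Int))) (i j c : Nat) (x : Int) :
    pvSet3 dp (i : Int) (j : Int) (c : Int) x = pvSetN dp i j c x := by
  simp [pvSet3, pvSetN, PySem.List.pySetD_natCast, PySem.List.pyGetD_natCast]

lemma pvGN_setN (dp : List (List (List Int))) (i j c : Nat) (x : Int) (i' j' c' : Nat)
    (hi : i < dp.length) (hj : j < (dp.getD i []).length)
    (hc : c < ((dp.getD i []).getD j []).length) :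
    pvGN (pvSetN dp i j c x) i' j' c' =
      if i' = i ∧ j' = j ∧ c' = c then x else pvGN dp i' j' c' := by
  unfold pvGN pvSetN
  by_cases hii : i' = i
  · subst hii
    rw [pvGetD_set_self _ _ _ _ hi]
    by_cases hjj : j' = j
    · subst hjj
      rw [pvGetD_set_self _ _ _ _ hj]
      by_cases hcc : c' = c
      · subst hcc; rw [pvGetD_set_self _ _ _ _ hc]; simp
      · rw [pvGetD_set_ne _ _ _ _ _ (Ne.symm hcc)]; simp [hcc]
    · rw [pvGetD_set_ne _ _ _ _ _ (Ne.symm hjj)]; simp [hjj]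
  · rw [pvGetD_set_ne _ _ _ _ _ (Ne.symm hii)]; simp [hii]

lemma pvShape_setN (grid : List (List Int)) (k : Int) (dp : List (List (List Int)))
    (i j c : Nat) (x : Int) (h : pvShape grid k dp) (hi : i < dp.length) :
    pvShape grid k (pvSetN dp i j c x) := by
  obtain ⟨h1, h2, h3⟩ := h
  refine ⟨by simp [pvSetN, h1], ?_, ?_⟩
  · intro i0 hi0
    by_cases hii : i0 = i
    · subst hii
      rw [pvSetN, pvGetD_set_self _ _ _ _ hi, List.length_set]
      exact h2 i0 hi0
    · rw [pvSetN, pvGetD_set_ne _ _ _ _ _ (Ne.symm hii)]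
      exact h2 i0 hi0
  · intro i0 j0 hi0 hj0
    by_cases hii : i0 = i
    · subst hii
      rw [pvSetN, pvGetD_set_self _ _ _ _ hi]
      by_cases hjj : j0 = j
      · subst hjj
        have hjlen : j0 < (dp.getD i0 []).length := by rw [h2 i0 hi0]; exact hj0
        rw [pvGetD_set_self _ _ _ _ hjlen, List.length_set]
        exact h3 i0 j0 hi0 hj0
      · rw [pvGetD_set_ne _ _ _ _ _ (Ne.symm hjj)]
        exact h3 i0 j0 hi0 hj0
    · rw [pvSetN, pvGetD_set_ne _ _ _ _ _ (Ne.symm hii)]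
      exact h3 i0 j0 hi0 hj0

lemma pvCostStep_spec (grid : List (List Int)) (k : Int) (t s u : Nat)
    (ht : t < grid.length) (hs : s < pvN grid) (hu : u < pvK k)
    (dp : List (List (List Int))) (hsh : pvShape grid k dp)
    (hcell : pvGN dp t s u = -1)
    (hdown : ∀ c, c < pvK k → t + 1 < grid.length → pvGN dp (t + 1) s c = pvV grid k (t + 1 : Nat) s c)
    (hright : ∀ c, c < pvK k → s + 1 < pvN grid → pvGN dp t (s + 1) c = pvV grid k t (s + 1 : Nat) c) :
    pvShape grid k (pvCostStep grid k grid.length (pvN grid) t s dp u) ∧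
    pvGN (pvCostStep grid k grid.length (pvN grid) t s dp u) t s u = pvV grid k t s u ∧
    (∀ i' j' c' : Nat, ¬(i' = t ∧ j' = s ∧ c' = u) →
      pvGN (pvCostStep grid k grid.length (pvN grid) t s dp u) i' j' c' = pvGN dp i' j' c') := by
  have hb1 : t < dp.length := by rw [hsh.1]; exact ht
  have hb2 : s < (dp.getD t []).length := by rw [hsh.2.1 t ht]; exact hs
  have hb3 : u < ((dp.getD t []).getD s []).length := by rw [hsh.2.2 t s ht hs]; exact hu
  simp only [pvCostStep]
  refine ⟨?_, ?_, ?_⟩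
  · split_ifs <;>
      first
        | exact hsh
        | (rw [pvSet3_natCast]; exact pvShape_setN grid k dp t s u _ hsh hb1)
  · rw [pvV]
    by_cases h1 : (if pvGet2 grid (t : Int) (s : Int) > 0 then (u : Int) + 1 else (u : Int)) > k
    · simp only [if_pos h1]
      exact hcell
    · simp only [if_neg h1]
      by_cases h2 : (t : Int) = ((grid.length : Nat) : Int) - 1 ∧
          (s : Int) = ((pvN grid : Nat) : Int) - 1
      · simp only [if_pos h2]
        rw [pvSet3_natCast, pvGN_setN dp t s u _ t s u hb1 hb2 hb3, if_pos ⟨rfl, rfl, rfl⟩]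
      · simp only [if_neg h2]
        obtain ⟨w, hw, hwK⟩ : ∃ w : Nat,
            (if pvGet2 grid (t : Int) (s : Int) > 0 then (u : Int) + 1 else (u : Int)) = (w : Int) ∧
            w < pvK k := by
          by_cases hg : pvGet2 grid (t : Int) (s : Int) > 0
          · exact ⟨u + 1, by rw [if_pos hg]; push_cast; ring,
              by rw [if_pos hg] at h1; unfold pvK; omega⟩
          · exact ⟨u, by rw [if_neg hg], by rw [if_neg hg] at h1; unfold pvK; omega⟩
        rw [hw]
        rw [show ((t : Int) + 1) = ((t + 1 : Nat) : Int) by push_cast; ring]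
        rw [show ((s : Int) + 1) = ((s + 1 : Nat) : Int) by push_cast; ring]
        simp only [dite_eq_ite, pvGet3_natCast, pvN]
        have hd : (if ((t + 1 : Nat) : Int) < ((grid.length : Nat) : Int) then
              pvGN dp (t + 1) s w else -1) =
            (if ((t + 1 : Nat) : Int) < ((grid.length : Nat) : Int) then
              pvV grid k ((t + 1 : Nat) : Int) (s : Int) (w : Int) else -1) := by
          split_ifs with hlt
          · exact hdown w hwK (by exact_mod_cast hlt)
          · rfl
        have hr : (if ((s + 1 : Nat) : Int) <
                (((PySem.List.pyGetD grid 0 ([] : List Int)).length : Nat) : Int) then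
              pvGN dp t (s + 1) w else -1) =
            (if ((s + 1 : Nat) : Int) <
                (((PySem.List.pyGetD grid 0 ([] : List Int)).length : Nat) : Int) then
              pvV grid k (t : Int) ((s + 1 : Nat) : Int) (w : Int) else -1) := by
          split_ifs with hlt
          · exact hright w hwK (by exact_mod_cast hlt)
          · rfl
        rw [hd, hr]
        split_ifs <;>
          first
            | (rw [pvSet3_natCast, pvGN_setN dp t s u _ t s u hb1 hb2 hb3,
                if_pos ⟨rfl, rfl, rfl⟩])
            | exact hcell
  · intro i' j' c' hne
    split_ifs <;>
      first
        | rfl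
        | (rw [pvSet3_natCast, pvGN_setN dp t s u _ i' j' c' hb1 hb2 hb3]; exact if_neg hne)

lemma pvCostLoop_spec (grid : List (List Int)) (k : Int) (t s : Nat)
    (ht : t < grid.length) (hs : s < pvN grid) :
    ∀ (u : Nat), u ≤ pvK k → ∀ dp, pvShape grid k dp →
    (∀ c, c < pvK k → pvGN dp t s c = -1) →
    (∀ c, c < pvK k → t + 1 < grid.length → pvGN dp (t + 1) s c = pvV grid k (t + 1 : Nat) s c) →
    (∀ c, c < pvK k → s + 1 < pvN grid → pvGN dp t (s + 1) c = pvV grid k t (s + 1 : Nat) c) →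
    pvShape grid k ((PySem.List.pyRange 0 (u : Int) 1).foldl (pvCostStep grid k grid.length (pvN grid) t s) dp) ∧
    (∀ c, c < pvK k →
      pvGN ((PySem.List.pyRange 0 (u : Int) 1).foldl (pvCostStep grid k grid.length (pvN grid) t s) dp) t s c =
        if c < u then pvV grid k t s c else -1) ∧
    (∀ i' j' c' : Nat, ¬(i' = t ∧ j' = s) →
      pvGN ((PySem.List.pyRange 0 (u : Int) 1).foldl (pvCostStep grid k grid.length (pvN grid) t s) dp) i' j' c' =
        pvGN dp i' j' c') := by
  intro u
  induction u with
  | zero =>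
    intro _ dp hsh hcells hdown hright
    rw [show ((0 : Nat) : Int) = 0 by simp, PySem.List.pyRange_one_eq_nil le_rfl]
    exact ⟨hsh, fun c hc => by simpa using hcells c hc, fun _ _ _ _ => rfl⟩
  | succ u ih =>
    intro hu dp hsh hcells hdown hright
    rw [show ((u + 1 : Nat) : Int) = (u : Int) + 1 by push_cast; ring,
      PySem.List.pyRange_one_succ_right (by positivity), List.foldl_append, List.foldl_cons,
      List.foldl_nil]
    obtain ⟨sh1, cells1, unch1⟩ := ih (by omega) dp hsh hcells hdown hright
    have hdown1 : ∀ c, c < pvK k → t + 1 < grid.length →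
        pvGN ((PySem.List.pyRange 0 (u : Int) 1).foldl (pvCostStep grid k grid.length (pvN grid) t s) dp)
          (t + 1) s c = pvV grid k (t + 1 : Nat) s c := by
      intro c hc hlt
      rw [unch1 (t + 1) s c (by omega)]
      exact hdown c hc hlt
    have hright1 : ∀ c, c < pvK k → s + 1 < pvN grid →
        pvGN ((PySem.List.pyRange 0 (u : Int) 1).foldl (pvCostStep grid k grid.length (pvN grid) t s) dp)
          t (s + 1) c = pvV grid k t (s + 1 : Nat) c := by
      intro c hc hlt
      rw [unch1 t (s + 1) c (by omega)]
      exact hright c hc hlt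
    have hcell1 : pvGN ((PySem.List.pyRange 0 (u : Int) 1).foldl (pvCostStep grid k grid.length (pvN grid) t s) dp)
        t s u = -1 := by
      rw [cells1 u (by omega), if_neg (by omega)]
    obtain ⟨sh2, val2, unch2⟩ :=
      pvCostStep_spec grid k t s u ht hs (by omega) _ sh1 hcell1 hdown1 hright1
    refine ⟨sh2, ?_, ?_⟩
    · intro c hc
      by_cases hcu : c = u
      · subst hcu
        rw [val2, if_pos (by omega)]
      · rw [unch2 t s c (by simp [hcu]), cells1 c hc]
        split_ifs <;> first | rfl | omega
    · intro i' j' c' hne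
      rw [unch2 i' j' c' (by tauto), unch1 i' j' c' hne]

lemma pvColStep_spec (grid : List (List Int)) (k : Int) (hk : 0 ≤ k) (t s : Nat)
    (ht : t < grid.length) (hs : s < pvN grid)
    (dp : List (List (List Int))) (h : pvRowDone grid k dp t (s + 1)) :
    pvRowDone grid k (pvColStep grid k grid.length (pvN grid) t dp s) t s := by
  have hK : ((pvK k : Nat) : Int) = k + 1 := by unfold pvK; omega
  have hcells : ∀ c, c < pvK k → pvGN dp t s c = -1 := by
    intro c hc
    rw [h.2 t s c ht hs hc, if_neg (by omega)]
  have hdown : ∀ c, c < pvK k → t + 1 < grid.length →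
      pvGN dp (t + 1) s c = pvV grid k (t + 1 : Nat) s c := by
    intro c hc hlt
    rw [h.2 (t + 1) s c hlt hs hc, if_pos (by omega)]
  have hright : ∀ c, c < pvK k → s + 1 < pvN grid →
      pvGN dp t (s + 1) c = pvV grid k t (s + 1 : Nat) c := by
    intro c hc hlt
    rw [h.2 t (s + 1) c ht hlt hc, if_pos (by omega)]
  have hloop := pvCostLoop_spec grid k t s ht hs (pvK k) le_rfl dp h.1 hcells hdown hright
  rw [pvColStep, ← hK]
  refine ⟨hloop.1, ?_⟩
  intro i j c hi hj hc
  by_cases hij : i = t ∧ j = s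
  · obtain ⟨rfl, rfl⟩ := hij
    rw [hloop.2.1 c hc, if_pos hc, if_pos (by omega)]
  · rw [hloop.2.2 i j c hij, h.2 i j c hi hj hc]
    split_ifs <;> first | rfl | omega

lemma pvColLoop_spec (grid : List (List Int)) (k : Int) (hk : 0 ≤ k) (t : Nat)
    (ht : t < grid.length) :
    ∀ (s : Nat), s ≤ pvN grid → ∀ dp, pvRowDone grid k dp t s →
    pvRowDone grid k
      ((PySem.List.pyRange ((s : Int) - 1) (-1) (-1)).foldl (pvColStep grid k grid.length (pvN grid) t) dp) t 0 := by
  intro s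
  induction s with
  | zero =>
    intro _ dp h
    rw [show ((0 : Nat) : Int) - 1 = -1 by simp, PySem.List.pyRange_neg_one_eq_nil le_rfl]
    exact h
  | succ s ih =>
    intro hs dp h
    rw [show ((s + 1 : Nat) : Int) - 1 = (s : Int) by push_cast; ring,
      PySem.List.pyRange_neg_one_cons (by omega : (-1 : Int) < (s : Int)), List.foldl_cons]
    exact ih (by omega) _ (pvColStep_spec grid k hk t s ht (by omega) dp h)

lemma pvRowStep_spec (grid : List (List Int)) (k : Int) (hk : 0 ≤ k) (t : Nat)
    (ht : t < grid.length) (dp : List (List (List Int))) (h : pvRowsDone grid k dp (t + 1)) :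
    pvRowsDone grid k (pvRowStep grid k grid.length (pvN grid) dp t) t := by
  have hstart : pvRowDone grid k dp t (pvN grid) := by
    refine ⟨h.1, ?_⟩
    intro i j c hi hj hc
    rw [h.2 i j c hi hj hc]
    split_ifs <;> first | rfl | omega
  have hend := pvColLoop_spec grid k hk t ht (pvN grid) le_rfl dp hstart
  unfold pvRowStep
  refine ⟨hend.1, ?_⟩
  intro i j c hi hj hc
  rw [hend.2 i j c hi hj hc]
  split_ifs <;> first | rfl | omega

lemma pvRowLoop_spec (grid : List (List Int)) (k : Int) (hk : 0 ≤ k) :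
    ∀ (t : Nat), t ≤ grid.length → ∀ dp, pvRowsDone grid k dp t →
    pvRowsDone grid k
      ((PySem.List.pyRange ((t : Int) - 1) (-1) (-1)).foldl (pvRowStep grid k grid.length (pvN grid)) dp) 0 := by
  intro t
  induction t with
  | zero =>
    intro _ dp h
    rw [show ((0 : Nat) : Int) - 1 = -1 by simp, PySem.List.pyRange_neg_one_eq_nil le_rfl]
    exact h
  | succ t ih =>
    intro ht dp h
    rw [show ((t + 1 : Nat) : Int) - 1 = (t : Int) by push_cast; ring,
      PySem.List.pyRange_neg_one_cons (by omega : (-1 : Int) < (t : Int)), List.foldl_cons]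
    exact ih (by omega) _ (pvRowStep_spec grid k hk t (by omega) dp h)

lemma pvInit_spec (grid : List (List Int)) (k : Int) :
    pvRowsDone grid k
      (List.replicate grid.length (List.replicate (pvN grid) (List.replicate (pvK k) (-1 : Int))))
      grid.length := by
  have hget : ∀ {α : Type} (n i : Nat) (x d : α),
      (List.replicate n x).getD i d = if i < n then x else d := by
    intro α n i x d
    simp [List.getD_eq_getElem?_getD, List.getElem?_replicate]
    split_ifs <;> rfl
  refine ⟨⟨by simp, ?_, ?_⟩, ?_⟩
  · intro i hi; rw [hget, if_pos hi]; simp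
  · intro i j hi hj; rw [hget, if_pos hi, hget, if_pos hj]; simp
  · intro i j c hi hj hc
    rw [pvGN, hget, if_pos hi, hget, if_pos hj, hget, if_pos hc, if_neg (by omega)]

lemma pvA_eq_V (grid : List (List Int)) (k : Int) (h : Pre_maxPathScore grid k) :
    maxPathScore grid k = pvV grid k 0 0 0 := by
  obtain ⟨hne, hn, _hrows, hk⟩ := h
  have hm : 0 < grid.length := List.length_pos_iff.mpr hne
  have hKpos : 0 < pvK k := by unfold pvK; omega
  unfold maxPathScore
  have hdone := pvRowLoop_spec grid k hk grid.length le_rfl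
    (List.replicate grid.length (List.replicate (pvN grid) (List.replicate (pvK k) (-1 : Int))))
    (pvInit_spec grid k)
  have hval := hdone.2 0 0 0 hm hn hKpos
  rw [if_pos (by omega)] at hval
  simp only [Int.toNat_natCast]
  have hget := pvGet3_natCast ((PySem.List.pyRange ((grid.length : Int) - 1) (-1) (-1)).foldl
    (pvRowStep grid k grid.length (pvN grid))
    (List.replicate grid.length (List.replicate (pvN grid) (List.replicate (pvK k) (-1 : Int))))) 0 0 0
  simp only [Nat.cast_zero] at hget
  rw [hget]
  exact hval

lemma pvAgrees_insert (grid : List (List Int)) (k : Int)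
    (memo : PySem.Dict (Int × Int × Int) Int) (i j c res : Int)
    (hag : pvAgrees grid k memo) (hres : res = pvV grid k i j c) :
    pvAgrees grid k (memo.insert (i, j, c) res) := by
  intro i' j' c' v hv
  rw [PySem.Dict.get?_insert] at hv
  split_ifs at hv with hkey
  · have : i' = i ∧ j' = j ∧ c' = c := by simpa [Prod.ext_iff] using hkey
    obtain ⟨rfl, rfl, rfl⟩ := this
    cases hv
    exact hres
  · exact hag i' j' c' v hv

lemma pvBRec_spec (grid : List (List Int)) (k : Int) :
    ∀ (fuel : Nat) (i j cost : Int) (memo : PySem.Dict (Int × Int × Int) Int),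
      ((grid.length - i).toNat + ((pvN grid : Int) - j).toNat) < fuel → pvAgrees grid k memo →
      (pvBRec grid k grid.length (pvN grid) fuel i j cost memo).1 = pvV grid k i j cost ∧
      pvAgrees grid k (pvBRec grid k grid.length (pvN grid) fuel i j cost memo).2 := by
  intro fuel
  induction fuel with
  | zero => intro i j cost memo hlt hag; omega
  | succ fuel ih =>
    intro i j cost memo hlt hag
    rw [pvBRec]
    cases hmem : memo.get? (i, j, cost) with
    | some v =>
      simp only [hmem]
      exact ⟨hag i j cost v hmem, hag⟩
    | none =>
      simp only [hmem]
      rw [pvV]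
      by_cases h1 : (if pvGet2 grid i j > 0 then cost + 1 else cost) > k
      · simp only [if_pos h1]
        refine ⟨?_, pvAgrees_insert grid k memo i j cost _ hag (by rw [pvV, if_pos h1])⟩
        first | rfl | trivial
      · simp only [if_neg h1]
        by_cases h2 : i = (grid.length : Int) - 1 ∧ j = ((pvN grid : Nat) : Int) - 1
        · simp only [if_pos h2]
          refine ⟨?_, pvAgrees_insert grid k memo i j cost _ hag
            (by rw [pvV, if_neg h1, if_pos h2])⟩
          first | rfl | trivial
        · simp only [if_neg h2]
          have H1 : (if i + 1 < ((grid.length : Nat) : Int) then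
                pvBRec grid k grid.length (pvN grid) fuel (i + 1) j
                  (if pvGet2 grid i j > 0 then cost + 1 else cost) memo
              else (-1, memo)).1 =
              (if i + 1 < ((grid.length : Nat) : Int) then
                pvV grid k (i + 1) j (if pvGet2 grid i j > 0 then cost + 1 else cost) else -1) ∧
              pvAgrees grid k (if i + 1 < ((grid.length : Nat) : Int) then
                pvBRec grid k grid.length (pvN grid) fuel (i + 1) j
                  (if pvGet2 grid i j > 0 then cost + 1 else cost) memo
              else (-1, memo)).2 := by
            by_cases hd : i + 1 < ((grid.length : Nat) : Int)
            · simp only [if_pos hd]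
              exact ih (i + 1) j _ memo (by omega) hag
            · simp only [if_neg hd]
              exact ⟨trivial, hag⟩
          have H2 : ∀ (memo1 : PySem.Dict (Int × Int × Int) Int), pvAgrees grid k memo1 →
              (if j + 1 < ((pvN grid : Nat) : Int) then
                pvBRec grid k grid.length (pvN grid) fuel i (j + 1)
                  (if pvGet2 grid i j > 0 then cost + 1 else cost) memo1
              else (-1, memo1)).1 =
              (if j + 1 < ((pvN grid : Nat) : Int) then
                pvV grid k i (j + 1) (if pvGet2 grid i j > 0 then cost + 1 else cost) else -1) ∧
              pvAgrees grid k (if j + 1 < ((pvN grid : Nat) : Int) then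
                pvBRec grid k grid.length (pvN grid) fuel i (j + 1)
                  (if pvGet2 grid i j > 0 then cost + 1 else cost) memo1
              else (-1, memo1)).2 := by
            intro memo1 hag1
            by_cases hr : j + 1 < ((pvN grid : Nat) : Int)
            · simp only [if_pos hr]
              exact ih i (j + 1) _ memo1 (by omega) hag1
            · simp only [if_neg hr]
              exact ⟨trivial, hag1⟩
          obtain ⟨H1v, H1a⟩ := H1
          obtain ⟨H2v, H2a⟩ := H2 _ H1a
          rw [H1v, H2v]
          refine ⟨?_, pvAgrees_insert grid k _ i j cost _ H2a ?_⟩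
          · simp only [dite_eq_ite]
          · conv_rhs => rw [pvV]
            simp only [if_neg h1, if_neg h2, dite_eq_ite]

lemma pvB_eq_V (grid : List (List Int)) (k : Int) :
    maxPathScore_alt grid k = pvV grid k 0 0 0 := by
  have hag : pvAgrees grid k PySem.Dict.empty := by
    intro i j c v hv
    rw [PySem.Dict.get?_empty] at hv
    cases hv
  have h := (pvBRec_spec grid k (grid.length + pvN grid + 1) 0 0 0 PySem.Dict.empty
    (by simp) hag).1
  unfold maxPathScore_alt
  simpa using h

-- ===== VERDICT (by name: the statement is the Claim_ definition above) =====
theorem maxPathScore_spec : Claim_equal_maxPathScore := by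
  intro grid k _hDom hPre
  show maxPathScore grid k = maxPathScore_alt grid k
  rw [pvA_eq_V grid k hPre, pvB_eq_V grid k]
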